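-- pv_equiv track=rewrite | github.com/agent-artifacts/ReCodeAgent | data/tool_projects/alphatrans/commons-cli/python/src/main/org/apache/commons/cli/HelpFormatter.py | _findWrapPos
-- ===== SOURCE A (Python) =====
-- def _findWrapPos(text: str, width: int, startPos: int) -> int:
--     pos = text.find("\n", startPos)
--     if pos != -1 and pos <= width:
--         return pos + 1
--
--     pos = text.find("\t", startPos)
--     if pos != -1 and pos <= width:
--         return pos + 1
--
--     if startPos + width >= len(text):
--         return -1
--
--     pos = startPos + width
--     while pos >= startPos:
--         c = text[pos]
--         if c == " " or c == "\n" or c == "\r":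
--             break
--         pos -= 1
--
--     if pos > startPos:
--         return pos
--
--     pos = startPos + width
--
--     return -1 if pos == len(text) else pos
-- ===== SOURCE B (Python) =====
-- def _findWrapPos(text: str, width: int, startPos: int) -> int:
--     # One forward pass from startPos computing everything A needs in three passes:
--     # the first '\n', the first '\t', and the last break char inside the wrap window.
--     n = len(text)
--     limit = startPos + width
--     first_nl = -1
--     first_tab = -1
--     last_break = -1
--     i = startPos
--     while i < n:
--         c = text[i]
--         if first_nl == -1 and c == "\n":
--             first_nl = i
--         if first_tab == -1 and c == "\t":
--             first_tab = i
--         if i <= limit and (c == " " or c == "\n" or c == "\r"):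
--             last_break = i
--         i += 1
--
--     if first_nl != -1 and first_nl <= width:
--         return first_nl + 1
--     if first_tab != -1 and first_tab <= width:
--         return first_tab + 1
--     if limit >= n:
--         return -1
--     if last_break > startPos:
--         return last_break
--     return limit
-- ===== Notes on version B (the rewrite author's own statement) =====
-- stated objective: alternative
-- what changed: A makes up to four staged traversals (text.find('\n'), text.find('\t'), then a backward character scan over the wrap window); B makes ONE forward pass from startPos that simultaneously records the first '\n', the first '\t' and the last break character inside the window, then applies A's decision logic to those three accumulators.
-- outside the precondition, e.g. on _findWrapPos('ab', 0, -2): A returns -2, B returns -1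
import Mathlib
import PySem

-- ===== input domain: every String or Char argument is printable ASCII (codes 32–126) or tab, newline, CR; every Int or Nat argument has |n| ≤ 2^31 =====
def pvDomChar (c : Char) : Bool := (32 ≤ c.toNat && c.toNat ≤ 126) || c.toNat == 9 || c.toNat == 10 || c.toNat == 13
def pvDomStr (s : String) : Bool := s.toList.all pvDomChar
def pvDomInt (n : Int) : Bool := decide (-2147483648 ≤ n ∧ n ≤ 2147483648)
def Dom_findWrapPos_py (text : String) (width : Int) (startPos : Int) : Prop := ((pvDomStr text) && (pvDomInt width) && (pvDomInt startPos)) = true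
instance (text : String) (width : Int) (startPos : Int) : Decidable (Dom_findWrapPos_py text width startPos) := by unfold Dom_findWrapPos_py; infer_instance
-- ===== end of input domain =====

-- B replaces A's staged traversals (two find calls plus a backward window scan) by ONE
-- forward pass from startPos accumulating first '\n', first '\t' and last window break.


-- ===== PORT A =====
-- A's `while pos >= startPos: … pos -= 1` loop; fuel (width+1).toNat lets pos run
-- from startPos+width down to startPos, then exit with pos = startPos - 1.
-- On an out-of-range index Python raises IndexError; under Pre_ (0 ≤ startPos) and the
-- guard startPos+width < len every accessed index is in range, so the none branch is unreachable.
def whileA (text : List Char) (startPos : Int) : Nat → Int → Int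
  | 0, pos => pos
  | fuel + 1, pos =>
    if startPos ≤ pos then
      match PySem.List.pyGet? text pos with
      | some c => if c = ' ' ∨ c = '\n' ∨ c = '\r' then pos else whileA text startPos fuel (pos - 1)
      | none => pos
    else pos

def findWrapPos_py (text : String) (width : Int) (startPos : Int) : Int :=
  let pos := PySem.Str.findFrom text "\n" startPos
  if pos ≠ -1 ∧ pos ≤ width then pos + 1
  else
    let pos := PySem.Str.findFrom text "\t" startPos
    if pos ≠ -1 ∧ pos ≤ width then pos + 1
    else if startPos + width ≥ (PySem.Str.len text : Int) then -1
    else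
      let pos := whileA text.toList startPos (width + 1).toNat (startPos + width)
      if pos > startPos then pos
      else
        let pos := startPos + width
        if pos = (PySem.Str.len text : Int) then -1 else pos

-- ===== PORT B =====
-- B's single `while i < n` loop over text, carrying the three accumulators
-- (first_nl, first_tab, last_break); fuel (n - i).toNat bounds the iterations,
-- text[i] is PySem.List.pyGet? (Python indexing incl. negative wraparound; its none
-- case is Python's IndexError, where B raises and the port's value is unclaimed).
def loopB (s : List Char) (n : Int) : Nat → Int → Int → Int → Int → Int → Int × Int × Int
  | 0, _, _, fn, ft, lb => (fn, ft, lb)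
  | fuel + 1, i, limit, fn, ft, lb =>
    if i < n then
      match PySem.List.pyGet? s i with
      | some c =>
          loopB s n fuel (i + 1) limit
            (if fn = -1 ∧ c = '\n' then i else fn)
            (if ft = -1 ∧ c = '\t' then i else ft)
            (if i ≤ limit ∧ (c = ' ' ∨ c = '\n' ∨ c = '\r') then i else lb)
      | none => (fn, ft, lb)
    else (fn, ft, lb)

def findWrapPos_py_alt (text : String) (width : Int) (startPos : Int) : Int :=
  let n : Int := PySem.Str.len text
  let limit := startPos + width
  let r := loopB text.toList n (n - startPos).toNat startPos limit (-1) (-1) (-1)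
  if r.1 ≠ -1 ∧ r.1 ≤ width then r.1 + 1
  else if r.2.1 ≠ -1 ∧ r.2.1 ≤ width then r.2.1 + 1
  else if limit ≥ n then -1
  else if r.2.2 > startPos then r.2.2
  else limit

-- ===== PRECONDITION & SPEC =====
-- Pre_ excludes negative startPos, which is outside the natural domain of a scan start
-- position: there A raises IndexError for sufficiently negative startPos, and otherwise
-- returns accidental values of Python's negative-index wraparound that B does not mimic.
def Pre_findWrapPos_py (text : String) (width : Int) (startPos : Int) : Prop := 0 ≤ startPos
instance (text : String) (width : Int) (startPos : Int) : Decidable (Pre_findWrapPos_py text width startPos) := by unfold Pre_findWrapPos_py; infer_instance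

def pvWitness_findWrapPos_py : String × Int × Int := ("a b c d", 3, 1)

def Spec_findWrapPos_py (text : String) (width : Int) (startPos : Int) (out : Int) : Prop := out = findWrapPos_py_alt text width startPos
instance (text : String) (width : Int) (startPos : Int) (out : Int) : Decidable (Spec_findWrapPos_py text width startPos out) := by unfold Spec_findWrapPos_py; infer_instance

-- ===== CLAIM =====
def Claim_equal_findWrapPos_py : Prop := ∀ (text : String) (width : Int) (startPos : Int), Dom_findWrapPos_py text width startPos → Pre_findWrapPos_py text width startPos → Spec_findWrapPos_py text width startPos (findWrapPos_py text width startPos)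

-- ===== LEMMAS AND PROOFS =====

-- list-structural form of B's loop, for 0 ≤ i (the Pre_ region)
def loopL : List Char → Int → Int → Int → Int → Int → Int × Int × Int
  | [], _, _, fn, ft, lb => (fn, ft, lb)
  | c :: rest, i, limit, fn, ft, lb =>
      loopL rest (i + 1) limit
        (if fn = -1 ∧ c = '\n' then i else fn)
        (if ft = -1 ∧ c = '\t' then i else ft)
        (if i ≤ limit ∧ (c = ' ' ∨ c = '\n' ∨ c = '\r') then i else lb)

theorem loopB_eq_loopL (s : List Char) : ∀ (m : Nat) (i limit fn ft lb : Int), 0 ≤ i →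
    ((s.length : Int) - i).toNat = m →
    loopB s (s.length : Int) m i limit fn ft lb = loopL (s.drop i.toNat) i limit fn ft lb := by
  intro m
  induction m with
  | zero =>
    intro i limit fn ft lb hi hm
    have hd : s.drop i.toNat = [] := List.drop_eq_nil_of_le (by omega)
    rw [hd]; rfl
  | succ m ih =>
    intro i limit fn ft lb hi hm
    have hlt : i < (s.length : Int) := by omega
    have hidx : i.toNat < s.length := by omega
    have hget : PySem.List.pyGet? s i = some s[i.toNat] := by
      simp only [PySem.List.pyGet?, PySem.List.pyIdx?]
      rw [if_pos hi, if_pos hlt]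
      simp only [Option.bind]
      rw [List.getElem?_eq_getElem hidx]
    have hd : s.drop i.toNat = s[i.toNat] :: s.drop (i.toNat + 1) :=
      List.drop_eq_getElem_cons hidx
    simp only [loopB]
    rw [if_pos hlt, hget, hd]
    simp only [loopL]
    have h1 : (i + 1).toNat = i.toNat + 1 := by omega
    rw [← h1]
    exact ih (i + 1) limit _ _ _ (by omega) (by omega)

-- first index i' ≥ i (in absolute coordinates) of character c in l, else -1
def firstIdx (c : Char) : List Char → Int → Int
  | [], _ => -1
  | x :: xs, i => if x = c then i else firstIdx c xs (i + 1)

-- forward accumulator for the last break index with the window bound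
def lastW (limit : Int) : List Char → Int → Int → Int
  | [], _, lb => lb
  | c :: xs, i, lb => lastW limit xs (i + 1) (if i ≤ limit ∧ (c = ' ' ∨ c = '\n' ∨ c = '\r') then i else lb)

-- the same without the window bound (applied to the truncated window)
def lastAll : List Char → Int → Int → Int
  | [], _, lb => lb
  | c :: xs, i, lb => lastAll xs (i + 1) (if c = ' ' ∨ c = '\n' ∨ c = '\r' then i else lb)

-- backward scan over positions k+t-1 … k, the shape of A's while loop
def lastScan (s : List Char) (k : Int) : Nat → Int
  | 0 => k - 1
  | t + 1 =>
    match s[(k + (t : Int)).toNat]? with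
    | some c => if c = ' ' ∨ c = '\n' ∨ c = '\r' then k + t else lastScan s k t
    | none => k - 1

theorem loopL_fst (l : List Char) : ∀ (i limit fn ft lb : Int), 0 ≤ i →
    (loopL l i limit fn ft lb).1 = if fn = -1 then firstIdx '\n' l i else fn := by
  induction l with
  | nil => intro i limit fn ft lb _; simp [loopL, firstIdx]
  | cons x xs ih =>
    intro i limit fn ft lb hi
    simp only [loopL, firstIdx]
    rw [ih (i+1) limit _ _ _ (by omega)]
    by_cases hfn : fn = -1
    · by_cases hx : x = '\n'
      · simp [hfn, hx]; omega
      · simp [hfn, hx]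
    · simp [hfn]
theorem loopL_snd (l : List Char) : ∀ (i limit fn ft lb : Int), 0 ≤ i →
    (loopL l i limit fn ft lb).2.1 = if ft = -1 then firstIdx '\t' l i else ft := by
  induction l with
  | nil => intro i limit fn ft lb _; simp [loopL, firstIdx]
  | cons x xs ih =>
    intro i limit fn ft lb hi
    simp only [loopL, firstIdx]
    rw [ih (i+1) limit _ _ _ (by omega)]
    by_cases hfn : ft = -1
    · by_cases hx : x = '\t'
      · simp [hfn, hx]; omega
      · simp [hfn, hx]
    · simp [hfn]
theorem loopL_thd (l : List Char) : ∀ (i limit fn ft lb : Int),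
    (loopL l i limit fn ft lb).2.2 = lastW limit l i lb := by
  induction l with
  | nil => intro i limit fn ft lb; simp [loopL, lastW]
  | cons x xs ih =>
    intro i limit fn ft lb
    simp only [loopL, lastW]
    rw [ih]
theorem go_firstIdx (c : Char) (l : List Char) : ∀ (m : Nat) (i : Int),
    firstIdx c l i = if PySem.Chars.find.go [c] l m = -1 then -1 else i + (PySem.Chars.find.go [c] l m - m) := by
  induction l with
  | nil => intro m i; simp [firstIdx, PySem.Chars.find.go]
  | cons x xs ih =>
    intro m i
    simp only [firstIdx, PySem.Chars.find.go]
    by_cases hx : x = c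
    · simp [List.isPrefixOf, hx]
    · have : ([c].isPrefixOf (x :: xs)) = false := by
        simp [List.isPrefixOf]; intro h; exact absurd h.symm hx
      rw [this]
      simp only [Bool.false_eq_true, if_false, if_neg hx]
      rw [ih (m+1) (i+1)]
      by_cases hz : PySem.Chars.find.go [c] xs (m+1) = -1
      · simp [hz]
      · simp only [hz, if_false]; push_cast; ring_nf
theorem findFrom_eq_firstIdx (s : List Char) (c : Char) (k : Int) (hk : 0 ≤ k) :
    PySem.Chars.findFrom s [c] k none = firstIdx c (s.drop k.toNat) k := by
  simp only [PySem.Chars.findFrom]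
  rw [if_neg (by omega : ¬ k < 0)]
  by_cases hlt : (s.length : Int) < k
  · rw [if_pos hlt]
    have : s.drop k.toNat = [] := by
      apply List.drop_eq_nil_of_le; omega
    simp [this, firstIdx]
  · rw [if_neg hlt]
    have ht : List.take (Int.toNat (s.length : Int)) s = s := by
      simp
    rw [ht]
    have := go_firstIdx c (s.drop k.toNat) 0 k
    simp only [PySem.Chars.find] at *
    rw [this]
    by_cases hz : PySem.Chars.find.go [c] (s.drop k.toNat) 0 = -1
    · simp [hz]
    · simp [hz]
theorem lastW_of_lt (limit : Int) : ∀ (l : List Char) (i lb : Int), limit < i →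
    lastW limit l i lb = lb := by
  intro l
  induction l with
  | nil => intro i lb _; rfl
  | cons x xs ih =>
    intro i lb h
    simp only [lastW]
    rw [if_neg (fun hc => absurd hc.1 (by omega)), ih (i+1) lb (by omega)]
theorem lastW_take (limit : Int) : ∀ (l : List Char) (i lb : Int),
    lastW limit l i lb = lastAll (l.take (limit - i + 1).toNat) i lb := by
  intro l
  induction l with
  | nil => intro i lb; simp [lastW, lastAll]
  | cons x xs ih =>
    intro i lb
    by_cases hi : i ≤ limit
    · have h1 : (limit - i + 1).toNat = (limit - (i+1) + 1).toNat + 1 := by omega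
      rw [h1, List.take_succ_cons]
      simp only [lastW, lastAll, hi, true_and]
      rw [ih (i+1)]
    · have h0 : (limit - i + 1).toNat = 0 := by omega
      rw [h0, List.take_zero]
      simp only [lastW, lastAll]
      rw [if_neg (fun hc => absurd hc.1 (by omega))]
      exact lastW_of_lt limit xs (i+1) lb (by omega)
theorem lastAll_append (c : Char) : ∀ (l : List Char) (i lb : Int),
    lastAll (l ++ [c]) i lb =
      if c = ' ' ∨ c = '\n' ∨ c = '\r' then i + l.length else lastAll l i lb := by
  intro l
  induction l with
  | nil => intro i lb; simp [lastAll]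
  | cons x xs ih =>
    intro i lb
    simp only [List.cons_append, lastAll, ih, List.length_cons]
    split <;> [skip; rfl]
    push_cast; ring_nf
theorem lastAll_scan (s : List Char) (k : Int) (hk : 0 ≤ k) :
    ∀ t : Nat, k + t ≤ (s.length : Int) →
      lastAll ((s.drop k.toNat).take t) k (-1) = lastScan s k t ∨
      (lastAll ((s.drop k.toNat).take t) k (-1) = -1 ∧ lastScan s k t = k - 1) := by
  intro t
  induction t with
  | zero => intro _; right; exact ⟨rfl, rfl⟩
  | succ t ih =>
    intro hle
    have hlen : k.toNat + t < s.length := by omega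
    have hdl : t < (s.drop k.toNat).length := by simp; omega
    have hget : (s.drop k.toNat)[t]? = some s[k.toNat + t] := by
      rw [List.getElem?_eq_getElem hdl]
      congr 1
      rw [List.getElem_drop]
    have htake : (s.drop k.toNat).take (t+1) = (s.drop k.toNat).take t ++ [s[k.toNat + t]] := by
      rw [List.take_add_one, hget]; rfl
    have hidx : (k + (t:Int)).toNat = k.toNat + t := by omega
    have hlt : ((s.drop k.toNat).take t).length = t := by simp; omega
    rw [htake, lastAll_append, hlt]
    simp only [lastScan, hidx, List.getElem?_eq_getElem hlen]
    by_cases hb : s[k.toNat + t] = ' ' ∨ s[k.toNat + t] = '\n' ∨ s[k.toNat + t] = '\r'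
    · left; simp [hb]
    · simp only [hb, if_false]
      exact ih (by omega)
theorem whileA_eq_lastScan (s : List Char) (k : Int) (hk : 0 ≤ k) :
    ∀ f : Nat, k + f ≤ (s.length : Int) →
      whileA s k f (k + f - 1) = lastScan s k f := by
  intro f
  induction f with
  | zero => intro _; simp only [whileA, lastScan, Nat.cast_zero, add_zero]
  | succ f ih =>
    intro hle
    have hp : k + (f + 1 : Nat) - 1 = k + f := by push_cast; ring
    have hlen : (k + (f:Int)).toNat < s.length := by omega
    have hget : PySem.List.pyGet? s (k + f) = some s[(k + (f:Int)).toNat] := by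
      simp only [PySem.List.pyGet?, PySem.List.pyIdx?]
      rw [if_pos (by omega), if_pos (by omega)]
      simp only [Option.bind]
      rw [List.getElem?_eq_getElem hlen]
    rw [hp]
    simp only [whileA, lastScan]
    rw [if_pos (by omega), hget]
    simp only [List.getElem?_eq_getElem hlen]
    by_cases hb : s[(k + (f:Int)).toNat] = ' ' ∨ s[(k + (f:Int)).toNat] = '\n' ∨ s[(k + (f:Int)).toNat] = '\r'
    · simp [hb]
    · simp only [hb, if_false]
      exact ih (by omega)
-- ===== VERDICT =====
theorem findWrapPos_py_spec : Claim_equal_findWrapPos_py := by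
  intro text width startPos _ hpre
  unfold Pre_findWrapPos_py at hpre
  unfold Spec_findWrapPos_py findWrapPos_py findWrapPos_py_alt
  dsimp only
  have hlenS : PySem.Str.len text = ((text.toList.length : Nat) : Int) := by
    simp [PySem.Str.len]
  rw [hlenS]
  rw [loopB_eq_loopL text.toList (((text.toList.length : Int)) - startPos).toNat startPos
    (startPos + width) (-1) (-1) (-1) hpre rfl]
  have hnl : PySem.Str.findFrom text "\n" startPos =
      firstIdx '\n' (text.toList.drop startPos.toNat) startPos := by
    rw [PySem.Str.findFrom_eq]
    exact findFrom_eq_firstIdx text.toList '\n' startPos hpre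
  have htb : PySem.Str.findFrom text "\t" startPos =
      firstIdx '\t' (text.toList.drop startPos.toNat) startPos := by
    rw [PySem.Str.findFrom_eq]
    exact findFrom_eq_firstIdx text.toList '\t' startPos hpre
  have hfst := loopL_fst (text.toList.drop startPos.toNat) startPos (startPos + width)
    (-1) (-1) (-1) hpre
  have hsnd := loopL_snd (text.toList.drop startPos.toNat) startPos (startPos + width)
    (-1) (-1) (-1) hpre
  have hthd := loopL_thd (text.toList.drop startPos.toNat) startPos (startPos + width)
    (-1) (-1) (-1)
  rw [if_pos rfl] at hfst hsnd
  rw [hnl, ← hfst]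
  by_cases h1 : (loopL (text.toList.drop startPos.toNat) startPos (startPos + width) (-1) (-1) (-1)).1 ≠ -1 ∧
      (loopL (text.toList.drop startPos.toNat) startPos (startPos + width) (-1) (-1) (-1)).1 ≤ width
  · rw [if_pos h1, if_pos h1]
  · rw [if_neg h1, if_neg h1, htb, ← hsnd]
    by_cases h2 : (loopL (text.toList.drop startPos.toNat) startPos (startPos + width) (-1) (-1) (-1)).2.1 ≠ -1 ∧
        (loopL (text.toList.drop startPos.toNat) startPos (startPos + width) (-1) (-1) (-1)).2.1 ≤ width
    · rw [if_pos h2, if_pos h2]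
    · rw [if_neg h2, if_neg h2]
      by_cases h3 : startPos + width ≥ (text.toList.length : Int)
      · rw [if_pos h3, if_pos h3]
      · rw [if_neg h3, if_neg h3]
        have hlen : startPos + width < (text.toList.length : Int) := by omega
        rw [hthd, lastW_take]
        by_cases hw0 : 0 ≤ width
        · have hT : (startPos + width - startPos + 1).toNat = (width + 1).toNat := by omega
          rw [hT]
          have hfle : startPos + ((width + 1).toNat : Int) ≤ (text.toList.length : Int) := by omega
          have hwhile := whileA_eq_lastScan text.toList startPos hpre (width + 1).toNat hfle
          have hp : startPos + ((width + 1).toNat : Int) - 1 = startPos + width := by omega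
          rw [hp] at hwhile
          rw [hwhile]
          rcases lastAll_scan text.toList startPos hpre (width + 1).toNat hfle with h | ⟨hA, hS⟩
          · rw [h]
            by_cases hgt : lastScan text.toList startPos (width + 1).toNat > startPos
            · rw [if_pos hgt, if_pos hgt]
            · rw [if_neg hgt, if_neg hgt, if_neg (by omega)]
          · rw [hA, hS]
            rw [if_neg (by omega), if_neg (by omega), if_neg (by omega)]
        · have hT : (startPos + width - startPos + 1).toNat = 0 := by omega
          have hf0 : (width + 1).toNat = 0 := by omega
          rw [hT, hf0, List.take_zero]
          have hwz : whileA text.toList startPos 0 (startPos + width) = startPos + width := rfl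
          have hlz : lastAll [] startPos (-1) = -1 := rfl
          rw [hwz, hlz, if_neg (by omega), if_neg (by omega), if_neg (by omega)]
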